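-- pv_equiv track=rewrite | github.com/shaunthebuilder/Open-GR-WM | app.py | build_text_batches
-- ===== SOURCE A (Python) =====
-- from typing import Callable, Dict, List, Optional, Tuple
--
-- def build_text_batches(
--     page_texts: List[str],
--     max_chars: int = 2800,
--     max_pages_per_batch: int = 3,
--     min_chars: int = 80,
-- ) -> List[Dict[str, object]]:
--     tasks: List[Dict[str, object]] = []
--     total_pages = len(page_texts)
--     i = 0
--     while i < total_pages:
--         page_text = (page_texts[i] or "").strip()
--         if len(page_text) < min_chars:
--             i += 1
--             continue
--         batch_pages = [i]
--         batch_parts = [f"[Page {i + 1}]\n{page_text}"]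
--         used = len(page_text)
--         j = i + 1
--         while j < total_pages and len(batch_pages) < max_pages_per_batch:
--             nxt = (page_texts[j] or "").strip()
--             if len(nxt) < min_chars:
--                 j += 1
--                 continue
--             if used + len(nxt) > max_chars:
--                 break
--             batch_pages.append(j)
--             batch_parts.append(f"[Page {j + 1}]\n{nxt}")
--             used += len(nxt)
--             j += 1
--         tasks.append(
--             {
--                 "type": "text",
--                 "data": "\n\n".join(batch_parts),
--                 "label": f"text batch pages {batch_pages[0] + 1}-{batch_pages[-1] + 1}/{total_pages}",
--             }
--         )
--         i = max(j, i + 1)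
--     return tasks
-- ===== SOURCE B (Python) =====
-- def build_text_batches(
--     page_texts,
--     max_chars=2800,
--     max_pages_per_batch=3,
--     min_chars=80,
-- ):
--     total = len(page_texts)
--
--     def flush(pages, parts):
--         return {
--             "type": "text",
--             "data": "\n\n".join(parts),
--             "label": f"text batch pages {pages[0] + 1}-{pages[-1] + 1}/{total}",
--         }
--
--     tasks = []
--     cur_pages, cur_parts, used = [], [], 0
--     for idx, raw in enumerate(page_texts):
--         text = (raw or "").strip()
--         if len(text) < min_chars:
--             continue
--         if cur_pages and (len(cur_pages) >= max_pages_per_batch or used + len(text) > max_chars):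
--             tasks.append(flush(cur_pages, cur_parts))
--             cur_pages, cur_parts, used = [], [], 0
--         cur_pages.append(idx)
--         cur_parts.append(f"[Page {idx + 1}]\n{text}")
--         used += len(text)
--     if cur_pages:
--         tasks.append(flush(cur_pages, cur_parts))
--     return tasks
-- ===== Notes on version B (the rewrite author's own statement) =====
-- stated objective: simpler
-- what changed: Replaces A's nested while-loops with index jumps (i = max(j, i+1)) by one linear pass over enumerate(page_texts) that keeps a current batch and flushes it before adding a page that would overflow max_chars or exceed max_pages_per_batch.
import Mathlib
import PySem

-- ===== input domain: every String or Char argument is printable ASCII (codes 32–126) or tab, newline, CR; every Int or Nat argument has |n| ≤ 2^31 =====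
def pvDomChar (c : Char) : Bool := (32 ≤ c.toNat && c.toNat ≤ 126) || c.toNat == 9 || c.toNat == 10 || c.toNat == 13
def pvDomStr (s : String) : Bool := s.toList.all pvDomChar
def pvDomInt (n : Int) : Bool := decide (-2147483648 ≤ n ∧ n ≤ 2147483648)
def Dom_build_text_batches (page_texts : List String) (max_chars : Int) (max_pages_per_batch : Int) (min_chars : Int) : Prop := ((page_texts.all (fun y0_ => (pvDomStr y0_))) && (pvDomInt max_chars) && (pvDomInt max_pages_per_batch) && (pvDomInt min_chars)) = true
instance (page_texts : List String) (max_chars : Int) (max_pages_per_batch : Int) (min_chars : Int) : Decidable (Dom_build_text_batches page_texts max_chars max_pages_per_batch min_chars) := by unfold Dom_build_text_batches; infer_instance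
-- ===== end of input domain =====

-- B replaces A's nested while/index-jump loops by a single linear pass with a flush-then-append
-- accumulator (objective: simpler); return values proved equal on all inputs (no mutation involved).

-- ===== PORT A =====
-- shared formatting helpers (identical f-string/join lines in both Pythons)
-- f"[Page {idx+1}]\n{text}"
def pvPagePart (idx : Int) (text : String) : String :=
  "[Page " ++ PySem.Int.toStr (idx + 1) ++ "]\n" ++ text

-- the task dict {"type","data","label"} built from batch pages/parts and the page total
def pvTask (pages : List Int) (parts : List String) (total : Nat) : List (String × String) :=
  [("type", "text"),
   ("data", PySem.Str.join "\n\n" parts),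
   ("label", "text batch pages " ++ PySem.Int.toStr (pages.headD 0 + 1) ++ "-"
      ++ PySem.Int.toStr (pages.getLastD 0 + 1) ++ "/" ++ PySem.Int.toStr (total : Int))]

-- A's inner `while j < total and len(batch_pages) < max_pages_per_batch` loop
def btbInner (pt : List String) (max_chars max_pages min_chars : Int) (total : Nat)
    (j : Nat) (bp : List Int) (parts : List String) (used : Int) :
    List Int × List String × Nat :=
  if _h : j < total ∧ (bp.length : Int) < max_pages then
    let nxt := PySem.Str.strip (pt.getD j "")
    if (PySem.Str.len nxt : Int) < min_chars then
      btbInner pt max_chars max_pages min_chars total (j + 1) bp parts used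
    else if used + (PySem.Str.len nxt : Int) > max_chars then
      (bp, parts, j)
    else
      btbInner pt max_chars max_pages min_chars total (j + 1)
        (bp ++ [(j : Int)]) (parts ++ [pvPagePart (j : Int) nxt])
        (used + (PySem.Str.len nxt : Int))
  else (bp, parts, j)
termination_by total - j
decreasing_by all_goals omega

-- A's outer `while i < total` loop
def btbOuter (pt : List String) (max_chars max_pages min_chars : Int) (total : Nat)
    (i : Nat) : List (List (String × String)) :=
  if _h : i < total then
    let page := PySem.Str.strip (pt.getD i "")
    if (PySem.Str.len page : Int) < min_chars then
      btbOuter pt max_chars max_pages min_chars total (i + 1)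
    else
      let r := btbInner pt max_chars max_pages min_chars total (i + 1)
        [(i : Int)] [pvPagePart (i : Int) page] ((PySem.Str.len page : Int))
      pvTask r.1 r.2.1 total ::
        btbOuter pt max_chars max_pages min_chars total (max r.2.2 (i + 1))
  else []
termination_by total - i
decreasing_by all_goals omega

def build_text_batches (page_texts : List String) (max_chars : Int) (max_pages_per_batch : Int) (min_chars : Int) : List (List (String × String)) :=
  btbOuter page_texts max_chars max_pages_per_batch min_chars page_texts.length 0

-- ===== PORT B =====
-- state = (tasks, cur_pages, cur_parts, used)
def btbState : Type := List (List (String × String)) × List Int × List String × Int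

-- one step of B's `for idx, raw in enumerate(page_texts)` loop
def btbStep (max_chars max_pages min_chars : Int) (total : Nat)
    (st : btbState) (p : Int × String) : btbState :=
  let text := PySem.Str.strip p.2
  if (PySem.Str.len text : Int) < min_chars then st
  else
    let st2 : btbState :=
      if st.2.1 ≠ [] ∧ ((st.2.1.length : Int) ≥ max_pages ∨
          st.2.2.2 + (PySem.Str.len text : Int) > max_chars) then
        (st.1 ++ [pvTask st.2.1 st.2.2.1 total], [], [], 0)
      else st
    (st2.1, st2.2.1 ++ [p.1], st2.2.2.1 ++ [pvPagePart p.1 text],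
      st2.2.2.2 + (PySem.Str.len text : Int))

-- the trailing `if cur_pages: tasks.append(flush(...))`
def btbFinish (st : btbState) (total : Nat) : List (List (String × String)) :=
  if st.2.1 ≠ [] then st.1 ++ [pvTask st.2.1 st.2.2.1 total] else st.1

def build_text_batches_alt (page_texts : List String) (max_chars : Int) (max_pages_per_batch : Int) (min_chars : Int) : List (List (String × String)) :=
  btbFinish
    ((PySem.List.enumerate page_texts 0).foldl
      (btbStep max_chars max_pages_per_batch min_chars page_texts.length)
      ([], [], [], 0))
    page_texts.length

-- ===== PRECONDITION & SPEC =====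
def Spec_build_text_batches (page_texts : List String) (max_chars : Int) (max_pages_per_batch : Int) (min_chars : Int) (out : List (List (String × String))) : Prop := out = build_text_batches_alt page_texts max_chars max_pages_per_batch min_chars
instance (page_texts : List String) (max_chars : Int) (max_pages_per_batch : Int) (min_chars : Int) (out : List (List (String × String))) : Decidable (Spec_build_text_batches page_texts max_chars max_pages_per_batch min_chars out) := by unfold Spec_build_text_batches; infer_instance

-- ===== CLAIM (what is proved, stated in full; the proofs are below) =====
def Claim_equal_build_text_batches : Prop := ∀ (page_texts : List String) (max_chars : Int) (max_pages_per_batch : Int) (min_chars : Int), Dom_build_text_batches page_texts max_chars max_pages_per_batch min_chars → Spec_build_text_batches page_texts max_chars max_pages_per_batch min_chars (build_text_batches page_texts max_chars max_pages_per_batch min_chars)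

-- ===== LEMMAS AND PROOFS =====

-- suffix-recursive characterisation of B's pass, indexed like A's loops
def bRec (pt : List String) (max_chars max_pages min_chars : Int) (total : Nat)
    (j : Nat) (cur : List Int) (parts : List String) (used : Int) :
    List (List (String × String)) :=
  if _h : j < total then
    let text := PySem.Str.strip (pt.getD j "")
    if (PySem.Str.len text : Int) < min_chars then
      bRec pt max_chars max_pages min_chars total (j + 1) cur parts used
    else if cur ≠ [] ∧ ((cur.length : Int) ≥ max_pages ∨
        used + (PySem.Str.len text : Int) > max_chars) then
      pvTask cur parts total ::
        bRec pt max_chars max_pages min_chars total (j + 1)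
          [(j : Int)] [pvPagePart (j : Int) text] ((PySem.Str.len text : Int))
    else
      bRec pt max_chars max_pages min_chars total (j + 1)
        (cur ++ [(j : Int)]) (parts ++ [pvPagePart (j : Int) text])
        (used + (PySem.Str.len text : Int))
  else if cur ≠ [] then [pvTask cur parts total] else []
termination_by total - j
decreasing_by all_goals omega

theorem btbInner_ge (pt : List String) (mc mp mn : Int) (total j : Nat)
    (bp : List Int) (parts : List String) (used : Int) :
    j ≤ (btbInner pt mc mp mn total j bp parts used).2.2 := by
  fun_induction btbInner pt mc mp mn total j bp parts used <;> dsimp only <;> omega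

-- B's fold over the enumerate-suffix starting at j equals bRec at index j
theorem fold_eq_bRec (pt : List String) (mc mp mn : Int) (j : Nat) (hj : j ≤ pt.length)
    (tasks : List (List (String × String))) (cur : List Int) (parts : List String) (used : Int) :
    btbFinish ((PySem.List.enumerate (pt.drop j) (j : Int)).foldl
        (btbStep mc mp mn pt.length) (tasks, cur, parts, used)) pt.length
      = tasks ++ bRec pt mc mp mn pt.length j cur parts used := by
  by_cases h : j < pt.length
  · rw [List.drop_eq_getElem_cons h, PySem.List.enumerate_cons, List.foldl_cons,
      show ((j : Int) + 1) = (((j + 1 : Nat)) : Int) by push_cast; ring]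
    rw [bRec]
    simp only [btbStep, List.getD_eq_getElem pt "" h, dif_pos h]
    split_ifs with h1 h2
    · exact fold_eq_bRec pt mc mp mn (j + 1) h tasks cur parts used
    · rw [fold_eq_bRec pt mc mp mn (j + 1) h _ _ _ _]
      simp [List.append_assoc]
    · exact fold_eq_bRec pt mc mp mn (j + 1) h tasks _ _ _
  · have hj' : j = pt.length := le_antisymm hj (Nat.le_of_not_lt h)
    subst hj'
    rw [bRec]
    simp only [List.drop_length, PySem.List.enumerate_nil, List.foldl_nil, dif_neg h, btbFinish]
    split_ifs <;> simp
termination_by pt.length - j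
decreasing_by all_goals omega

-- a running batch: B's pass from j equals "finish A's inner loop, then restart A's outer loop"
theorem bRec_cons (pt : List String) (mc mp mn : Int) (j : Nat)
    (cur : List Int) (parts : List String) (used : Int) (hcur : cur ≠ []) :
    bRec pt mc mp mn pt.length j cur parts used
      = pvTask (btbInner pt mc mp mn pt.length j cur parts used).1
          (btbInner pt mc mp mn pt.length j cur parts used).2.1 pt.length ::
        btbOuter pt mc mp mn pt.length
          (btbInner pt mc mp mn pt.length j cur parts used).2.2 := by
  rw [bRec]
  by_cases h : j < pt.length
  · rw [dif_pos h]
    dsimp only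
    by_cases hs : (PySem.Str.len (PySem.Str.strip (pt.getD j "")) : Int) < mn
    · rw [if_pos hs]
      by_cases hf : (cur.length : Int) < mp
      · have hI : btbInner pt mc mp mn pt.length j cur parts used
            = btbInner pt mc mp mn pt.length (j + 1) cur parts used := by
          rw [btbInner, dif_pos ⟨h, hf⟩]; dsimp only; rw [if_pos hs]
        rw [hI]
        exact bRec_cons pt mc mp mn (j + 1) cur parts used hcur
      · have hI : btbInner pt mc mp mn pt.length j cur parts used = (cur, parts, j) := by
          rw [btbInner, dif_neg (fun hc => hf hc.2)]
        have hI2 : btbInner pt mc mp mn pt.length (j + 1) cur parts used = (cur, parts, j + 1) := by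
          rw [btbInner, dif_neg (fun hc => hf hc.2)]
        rw [bRec_cons pt mc mp mn (j + 1) cur parts used hcur, hI, hI2]
        dsimp only
        have hO : btbOuter pt mc mp mn pt.length j = btbOuter pt mc mp mn pt.length (j + 1) := by
          rw [btbOuter, dif_pos h]; dsimp only; rw [if_pos hs]
        rw [hO]
    · rw [if_neg hs]
      by_cases hfl : cur ≠ [] ∧ ((cur.length : Int) ≥ mp ∨
          used + (PySem.Str.len (PySem.Str.strip (pt.getD j "")) : Int) > mc)
      · rw [if_pos hfl]
        have hI : btbInner pt mc mp mn pt.length j cur parts used = (cur, parts, j) := by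
          by_cases hf : (cur.length : Int) < mp
          · have ho : used + (PySem.Str.len (PySem.Str.strip (pt.getD j "")) : Int) > mc := by
              rcases hfl.2 with hge | ho
              · omega
              · exact ho
            rw [btbInner, dif_pos ⟨h, hf⟩]; dsimp only; rw [if_neg hs, if_pos ho]
          · rw [btbInner, dif_neg (fun hc => hf hc.2)]
        rw [hI]
        dsimp only
        congr 1
        rw [bRec_cons pt mc mp mn (j + 1) [(j : Int)]
          [pvPagePart (j : Int) (PySem.Str.strip (pt.getD j ""))]
          ((PySem.Str.len (PySem.Str.strip (pt.getD j "")) : Int)) (by simp)]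
        conv_rhs => rw [btbOuter]
        rw [dif_pos h]
        dsimp only
        rw [if_neg hs, Nat.max_eq_left (btbInner_ge pt mc mp mn pt.length (j + 1) _ _ _)]
      · rw [if_neg hfl]
        have hfo : ¬ ((cur.length : Int) ≥ mp) ∧
            ¬ (used + (PySem.Str.len (PySem.Str.strip (pt.getD j "")) : Int) > mc) := by
          by_contra hc
          exact hfl ⟨hcur, by tauto⟩
        have hI : btbInner pt mc mp mn pt.length j cur parts used
            = btbInner pt mc mp mn pt.length (j + 1)
                (cur ++ [(j : Int)])
                (parts ++ [pvPagePart (j : Int) (PySem.Str.strip (pt.getD j ""))])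
                (used + (PySem.Str.len (PySem.Str.strip (pt.getD j "")) : Int)) := by
          rw [btbInner, dif_pos ⟨h, by omega⟩]; dsimp only; rw [if_neg hs, if_neg hfo.2]
        rw [hI]
        exact bRec_cons pt mc mp mn (j + 1) _ _ _ (by simp)
  · rw [dif_neg h, if_pos hcur]
    have hI : btbInner pt mc mp mn pt.length j cur parts used = (cur, parts, j) := by
      rw [btbInner, dif_neg (fun hc => h hc.1)]
    rw [hI]
    dsimp only
    rw [btbOuter, dif_neg h]
termination_by pt.length - j
decreasing_by all_goals omega

-- no running batch: B's pass from i equals A's outer loop from i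
theorem bRec_empty (pt : List String) (mc mp mn : Int) (i : Nat) :
    bRec pt mc mp mn pt.length i [] [] 0 = btbOuter pt mc mp mn pt.length i := by
  rw [bRec, btbOuter]
  by_cases h : i < pt.length
  · rw [dif_pos h, dif_pos h]
    dsimp only
    by_cases hs : (PySem.Str.len (PySem.Str.strip (pt.getD i "")) : Int) < mn
    · rw [if_pos hs, if_pos hs]
      exact bRec_empty pt mc mp mn (i + 1)
    · rw [if_neg hs, if_neg hs, if_neg (by simp)]
      simp only [List.nil_append, Int.zero_add]
      rw [bRec_cons pt mc mp mn (i + 1) [(i : Int)]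
        [pvPagePart (i : Int) (PySem.Str.strip (pt.getD i ""))]
        ((PySem.Str.len (PySem.Str.strip (pt.getD i "")) : Int)) (by simp),
        Nat.max_eq_left (btbInner_ge pt mc mp mn pt.length (i + 1) _ _ _)]
  · rw [dif_neg h, dif_neg h, if_neg (by simp)]
termination_by pt.length - i
decreasing_by all_goals omega

-- ===== VERDICT (by name: the statement is the Claim_ definition above) =====
theorem build_text_batches_spec : Claim_equal_build_text_batches := by
  intro pt mc mp mn _
  unfold Spec_build_text_batches build_text_batches build_text_batches_alt
  have h := fold_eq_bRec pt mc mp mn 0 (Nat.zero_le _) [] [] [] 0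
  simp only [List.drop_zero, Nat.cast_zero] at h
  rw [h, List.nil_append, bRec_empty]
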